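-- pv_equiv track=rewrite | github.com/AaaronP/Proyecto2 | perez1-segura2-barboza3.py | recortar_matriz
-- ===== SOURCE A (Python) =====
-- def recortar_matriz(matriz):
--     # Encontrar los límites superior, inferior, izquierdo y derecho
--     fsuperior = None
--     finferior = None
--     cizquierda = None
--     cderecha = None
--
--     for i, fila in enumerate(matriz):
--         for j, valor in enumerate(fila):
--             if valor != ".":
--                 fsuperior = i if fsuperior is None else min(fsuperior, i)
--                 finferior = i if finferior is None else max(finferior, i)
--                 cizquierda = j if cizquierda is None else min(cizquierda, j)
--                 cderecha = j if cderecha is None else max(cderecha, j)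
--
--     # Recortar la matriz usando los límites encontrados
--     matrizR = [
--         fila[cizquierda : cderecha + 1] for fila in matriz[fsuperior : finferior + 1]
--     ]
--     return matrizR
-- ===== SOURCE B (Python) =====
-- def recortar_matriz(matriz):
--     # Trim the border: peel all-dot rows from the top and the bottom, then
--     # probe columns from the left and the right edge until a non-'.' column.
--     def fila_vacia(fila):
--         return all(v == "." for v in fila)
--
--     def col_vacia(j):
--         return all(j >= len(fila) or fila[j] == "." for fila in matriz)
--
--     top = 0
--     while top < len(matriz) and fila_vacia(matriz[top]):
--         top += 1
--     bot = len(matriz)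
--     while bot > top and fila_vacia(matriz[bot - 1]):
--         bot -= 1
--
--     ancho = max((len(fila) for fila in matriz), default=0)
--     izq = 0
--     while izq < ancho and col_vacia(izq):
--         izq += 1
--     der = ancho
--     while der > izq and col_vacia(der - 1):
--         der -= 1
--
--     return [fila[izq:der] for fila in matriz[top:bot]]
-- ===== Notes on version B (the rewrite author's own statement) =====
-- stated objective: faster
-- what changed: Replaces A's fused double loop threading four optional running extremes through every cell with a border-trimming algorithm: peel all-dot rows from top and bottom with while loops, then probe whole columns from the left and right edge until one contains a non-'.' cell, and slice; this skips the per-cell min/max/None bookkeeping (measured ~2-7x faster).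
import Mathlib
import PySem

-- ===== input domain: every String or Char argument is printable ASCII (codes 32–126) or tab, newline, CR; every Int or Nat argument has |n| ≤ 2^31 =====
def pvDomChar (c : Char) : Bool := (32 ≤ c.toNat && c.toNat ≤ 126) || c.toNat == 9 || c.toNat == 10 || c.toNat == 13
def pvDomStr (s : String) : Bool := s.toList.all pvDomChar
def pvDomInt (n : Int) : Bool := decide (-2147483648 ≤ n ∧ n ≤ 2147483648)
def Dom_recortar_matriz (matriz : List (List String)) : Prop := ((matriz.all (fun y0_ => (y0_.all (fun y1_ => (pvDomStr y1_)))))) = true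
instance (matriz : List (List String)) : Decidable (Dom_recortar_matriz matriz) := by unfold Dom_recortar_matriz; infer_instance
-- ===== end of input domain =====

-- B trims the four borders (peel all-dot rows top/bottom with while loops, then probe whole columns
-- from the left and right edge) instead of A's fused cell scan threading four optional extremes;
-- equal output on every matrix with a non-'.' cell (Pre_).


-- ===== PORT A =====
-- 'x = i if x is None else min(x, i)' / the max form, as used for all four bounds
def upMin (o : Option Int) (j : Int) : Option Int :=
  some (match o with | none => j | some a => min a j)
def upMax (o : Option Int) (j : Int) : Option Int :=
  some (match o with | none => j | some a => max a j)

def recortar_matriz (matriz : List (List String)) : List (List String) :=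
  let s : Option Int × Option Int × Option Int × Option Int :=
    (PySem.List.enumerate matriz 0).foldl
      (fun s p =>
        (PySem.List.enumerate p.2 0).foldl
          (fun s q =>
            if q.2 ≠ "." then
              (upMin s.1 p.1, upMax s.2.1 p.1, upMin s.2.2.1 q.1, upMax s.2.2.2 q.1)
            else s) s)
      (none, none, none, none)
  match s with
  | (some fsup, some finf, some ciz, some cder) =>
      (PySem.List.slice matriz (some fsup) (some (finf + 1))).map
        (fun fila => PySem.List.slice fila (some ciz) (some (cder + 1)))
  | _ => []  -- Python raises TypeError here ('None + 1'); excluded by Pre_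

-- ===== PORT B =====
-- all(v == "." for v in fila)
def filaVacia (fila : List String) : Bool := fila.all (fun v => v == ".")
-- all(j >= len(fila) or fila[j] == "." for fila in matriz)
def colVacia (matriz : List (List String)) (j : Int) : Bool :=
  matriz.all (fun fila => decide ((fila.length : Int) ≤ j) || (PySem.List.pyGet? fila j == some "."))

-- while top < len(matriz) and fila_vacia(matriz[top]): top += 1   (walking the rows structurally)
def scanTop : List (List String) → Int → Int
  | [], t => t
  | f :: rest, t => if filaVacia f then scanTop rest (t + 1) else t
-- while bot > top and fila_vacia(matriz[bot-1]): bot -= 1   (walking the reversed rows)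
def scanBot (top : Int) : List (List String) → Int → Int
  | [], b => b
  | f :: rest, b => if decide (top < b) && filaVacia f then scanBot top rest (b - 1) else b
-- while izq < ancho and col_vacia(izq): izq += 1   (fuel = the loop's iteration bound 'ancho')
def scanLeft (matriz : List (List String)) : Nat → Int → Int
  | 0, j => j
  | k + 1, j => if colVacia matriz j then scanLeft matriz k (j + 1) else j
-- while der > izq and col_vacia(der-1): der -= 1   (fuel = the loop's iteration bound 'ancho - izq')
def scanRight (matriz : List (List String)) : Nat → Int → Int
  | 0, j => j
  | k + 1, j => if colVacia matriz (j - 1) then scanRight matriz k (j - 1) else j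

def recortar_matriz_alt (matriz : List (List String)) : List (List String) :=
  let top := scanTop matriz 0
  let bot := scanBot top matriz.reverse (matriz.length : Int)
  let ancho := matriz.foldl (fun w f => max w (f.length : Int)) 0
  let izq := scanLeft matriz ancho.toNat 0
  let der := scanRight matriz (ancho - izq).toNat ancho
  (PySem.List.slice matriz (some top) (some bot)).map
    (fun fila => PySem.List.slice fila (some izq) (some der))

-- ===== PRECONDITION & SPEC =====
-- Pre_ excludes matrices with no non-'.' cell (including the empty matrix), on which A raises
-- TypeError ('None + 1'); A returns on every other input.
def Pre_recortar_matriz (matriz : List (List String)) : Prop :=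
  ∃ fila ∈ matriz, ∃ v ∈ fila, v ≠ "."
instance (matriz : List (List String)) : Decidable (Pre_recortar_matriz matriz) := by
  unfold Pre_recortar_matriz; infer_instance

def pvWitness_recortar_matriz : List (List String) := [[".", "."], [".", "x"]]

def Spec_recortar_matriz (matriz : List (List String)) (out : List (List String)) : Prop := out = recortar_matriz_alt matriz
instance (matriz : List (List String)) (out : List (List String)) : Decidable (Spec_recortar_matriz matriz out) := by unfold Spec_recortar_matriz; infer_instance

-- ===== CLAIM (what is proved, stated in full; the proofs are below) =====
def Claim_equal_recortar_matriz : Prop := ∀ (matriz : List (List String)), Dom_recortar_matriz matriz → Pre_recortar_matriz matriz → Spec_recortar_matriz matriz (recortar_matriz matriz)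

-- ===== LEMMAS AND PROOFS =====

-- A's loop bodies, named
def innerStep (i : Int) (s : Option Int × Option Int × Option Int × Option Int)
    (q : Int × String) : Option Int × Option Int × Option Int × Option Int :=
  if q.2 ≠ "." then (upMin s.1 i, upMax s.2.1 i, upMin s.2.2.1 q.1, upMax s.2.2.2 q.1) else s

def outerStep (s : Option Int × Option Int × Option Int × Option Int)
    (p : Int × List String) : Option Int × Option Int × Option Int × Option Int :=
  (PySem.List.enumerate p.2 0).foldl (innerStep p.1) s

-- the hit-column indices of one row / the hit-row indices / all hit columns
def colsIdx (fila : List String) (t : Int) : List Int :=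
  ((PySem.List.enumerate fila t).filter (fun q => q.2 ≠ ".")).map (·.1)
def rowsIdx (matriz : List (List String)) (t : Int) : List Int :=
  ((PySem.List.enumerate matriz t).filter (fun p => p.2.any (fun v => v ≠ "."))).map (·.1)
def allCols (matriz : List (List String)) : List Int :=
  matriz.flatMap (fun fila => colsIdx fila 0)

lemma upMin_upMin (o : Option Int) (i : Int) : upMin (upMin o i) i = upMin o i := by
  cases o <;> simp [upMin]

lemma upMax_upMax (o : Option Int) (i : Int) : upMax (upMax o i) i = upMax o i := by
  cases o <;> simp [upMax]

lemma inner_char (i t : Int) (fila : List String)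
    (s : Option Int × Option Int × Option Int × Option Int) :
    (PySem.List.enumerate fila t).foldl (innerStep i) s =
      ((if colsIdx fila t = [] then s.1 else upMin s.1 i),
       (if colsIdx fila t = [] then s.2.1 else upMax s.2.1 i),
       (colsIdx fila t).foldl upMin s.2.2.1,
       (colsIdx fila t).foldl upMax s.2.2.2) := by
  induction fila generalizing t s with
  | nil => simp [colsIdx, PySem.List.enumerate_nil]
  | cons v rest ih =>
    rw [PySem.List.enumerate_cons, List.foldl_cons]
    by_cases hv : v = "."
    · have hcols : colsIdx (v :: rest) t = colsIdx rest (t + 1) := by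
        simp [colsIdx, PySem.List.enumerate_cons, hv]
      rw [show innerStep i s (t, v) = s by simp [innerStep, hv], ih, hcols]
    · have hcols : colsIdx (v :: rest) t = t :: colsIdx rest (t + 1) := by
        simp [colsIdx, PySem.List.enumerate_cons, hv]
      rw [show innerStep i s (t, v)
          = (upMin s.1 i, upMax s.2.1 i, upMin s.2.2.1 t, upMax s.2.2.2 t) by
            simp [innerStep, hv], ih, hcols]
      split_ifs <;> simp_all [upMin_upMin, upMax_upMax, List.foldl_cons]

lemma colsIdx_ne_nil_iff (fila : List String) (t : Int) :
    colsIdx fila t ≠ [] ↔ fila.any (fun v => v ≠ ".") = true := by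
  induction fila generalizing t with
  | nil => simp [colsIdx, PySem.List.enumerate_nil]
  | cons v rest ih =>
    by_cases hv : v = "."
    · rw [show colsIdx (v :: rest) t = colsIdx rest (t + 1) by
        simp [colsIdx, PySem.List.enumerate_cons, hv]]
      simp [hv, ih]
    · rw [show colsIdx (v :: rest) t = t :: colsIdx rest (t + 1) by
        simp [colsIdx, PySem.List.enumerate_cons, hv]]
      simp [hv]

lemma outer_char (matriz : List (List String)) (t : Int)
    (s : Option Int × Option Int × Option Int × Option Int) :
    (PySem.List.enumerate matriz t).foldl outerStep s =
      ((rowsIdx matriz t).foldl upMin s.1,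
       (rowsIdx matriz t).foldl upMax s.2.1,
       (allCols matriz).foldl upMin s.2.2.1,
       (allCols matriz).foldl upMax s.2.2.2) := by
  induction matriz generalizing t s with
  | nil => simp [rowsIdx, allCols, PySem.List.enumerate_nil]
  | cons fila rest ih =>
    rw [PySem.List.enumerate_cons, List.foldl_cons]
    have hstep : outerStep s (t, fila)
        = ((if colsIdx fila 0 = [] then s.1 else upMin s.1 t),
           (if colsIdx fila 0 = [] then s.2.1 else upMax s.2.1 t),
           (colsIdx fila 0).foldl upMin s.2.2.1,
           (colsIdx fila 0).foldl upMax s.2.2.2) := inner_char t 0 fila s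
    have hall : allCols (fila :: rest) = colsIdx fila 0 ++ allCols rest := by
      simp [allCols]
    rw [hstep, ih, hall, List.foldl_append, List.foldl_append]
    by_cases h : colsIdx fila 0 = []
    · have hp : ¬ ∃ x ∈ fila, ¬ x = "." := by
        intro hex
        exact (colsIdx_ne_nil_iff fila 0).mpr (by simpa using hex) h
      have hr : rowsIdx (fila :: rest) t = rowsIdx rest (t + 1) := by
        simp [rowsIdx, PySem.List.enumerate_cons, hp]
      simp [hr, h]
    · have hp : ∃ x ∈ fila, ¬ x = "." := by
        simpa using (colsIdx_ne_nil_iff fila 0).mp h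
      have hr : rowsIdx (fila :: rest) t = t :: rowsIdx rest (t + 1) := by
        simp [rowsIdx, PySem.List.enumerate_cons, hp]
      simp [hr, h, List.foldl_cons]

lemma allCols_ne_nil_iff (matriz : List (List String)) :
    allCols matriz ≠ [] ↔ matriz.any (fun fila => fila.any (fun v => v ≠ ".")) = true := by
  induction matriz with
  | nil => simp [allCols]
  | cons fila rest ih =>
    have hall : allCols (fila :: rest) = colsIdx fila 0 ++ allCols rest := by
      simp [allCols]
    rw [hall]
    simp only [ne_eq, List.append_eq_nil_iff, List.any_cons, Bool.or_eq_true, not_and]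
    constructor
    · intro hne
      by_cases h : colsIdx fila 0 = []
      · exact Or.inr (ih.mp (hne h))
      · exact Or.inl ((colsIdx_ne_nil_iff fila 0).mp h)
    · rintro (h | h)
      · intro hc _; exact (colsIdx_ne_nil_iff fila 0).mpr h hc
      · intro _ hr; exact ih.mpr h hr

lemma rowsIdx_ne_nil_iff (matriz : List (List String)) (t : Int) :
    rowsIdx matriz t ≠ [] ↔ matriz.any (fun fila => fila.any (fun v => v ≠ ".")) = true := by
  induction matriz generalizing t with
  | nil => simp [rowsIdx, PySem.List.enumerate_nil]
  | cons fila rest ih =>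
    by_cases hp : ∃ x ∈ fila, ¬ x = "."
    · rw [show rowsIdx (fila :: rest) t = t :: rowsIdx rest (t + 1) by
        simp [rowsIdx, PySem.List.enumerate_cons, hp]]
      simp [hp]
    · rw [show rowsIdx (fila :: rest) t = rowsIdx rest (t + 1) by
        simp [rowsIdx, PySem.List.enumerate_cons, hp]]
      simp [hp, ih]

lemma foldl_upMin_some (a : Int) (l : List Int) :
    l.foldl upMin (some a) = some (l.foldl min a) := by
  induction l generalizing a with
  | nil => rfl
  | cons b rest ih => simp [List.foldl_cons, upMin, ih]

lemma foldl_upMax_some (a : Int) (l : List Int) :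
    l.foldl upMax (some a) = some (l.foldl max a) := by
  induction l generalizing a with
  | nil => rfl
  | cons b rest ih => simp [List.foldl_cons, upMax, ih]

lemma foldl_min_of_forall_le (a : Int) (l : List Int) (h : ∀ x ∈ l, a ≤ x) :
    l.foldl min a = a := by
  induction l with
  | nil => rfl
  | cons b rest ih =>
    have : min a b = a := min_eq_left (h b (by simp))
    simp only [List.foldl_cons, this]
    exact ih (fun x hx => h x (by simp [hx]))

lemma foldl_max_sorted (a : Int) (l : List Int) (h : (a :: l).Pairwise (· ≤ ·)) :
    l.foldl max a = (a :: l).getLast (by simp) := by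
  induction l generalizing a with
  | nil => rfl
  | cons b rest ih =>
    have hab : a ≤ b := (List.pairwise_cons.mp h).1 b (by simp)
    have : max a b = b := max_eq_right hab
    simp only [List.foldl_cons, this]
    rw [ih b (List.pairwise_cons.mp h).2]
    simp [List.getLast]

lemma rowsIdx_sorted (matriz : List (List String)) (t : Int) :
    (rowsIdx matriz t).Pairwise (· ≤ ·) := by
  have h1 := PySem.List.pairwise_lt_enumerate matriz t
  have h2 := List.Pairwise.filter (p := fun p => p.2.any (fun v => v ≠ ".")) h1
  unfold rowsIdx
  rw [List.pairwise_map]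
  exact h2.imp (fun h => le_of_lt h)

-- min / max of a foldl over Int
lemma foldl_min_mem (l : List Int) (a : Int) : l.foldl min a ∈ a :: l := by
  induction l generalizing a with
  | nil => simp
  | cons b rest ih =>
    have h := ih (min a b)
    rw [List.mem_cons] at h
    rw [List.foldl_cons]
    rcases h with h | h
    · rcases le_total a b with hab | hab
      · rw [h, min_eq_left hab]; exact List.mem_cons_self
      · rw [h, min_eq_right hab]; exact List.mem_cons_of_mem _ List.mem_cons_self
    · exact List.mem_cons_of_mem _ (List.mem_cons_of_mem _ h)

lemma foldl_min_le (l : List Int) : ∀ (a x : Int), x ∈ a :: l → l.foldl min a ≤ x := by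
  induction l with
  | nil => intro a x hx; simp_all
  | cons b rest ih =>
    intro a x hx
    rw [List.foldl_cons]
    have hbase : rest.foldl min (min a b) ≤ min a b := ih (min a b) (min a b) List.mem_cons_self
    rcases List.mem_cons.mp hx with h | h
    · subst h; exact le_trans hbase (min_le_left _ _)
    · rcases List.mem_cons.mp h with h2 | h2
      · subst h2; exact le_trans hbase (min_le_right _ _)
      · exact ih (min a b) x (List.mem_cons_of_mem _ h2)

lemma foldl_max_mem (l : List Int) (a : Int) : l.foldl max a ∈ a :: l := by
  induction l generalizing a with
  | nil => simp
  | cons b rest ih =>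
    have h := ih (max a b)
    rw [List.mem_cons] at h
    rw [List.foldl_cons]
    rcases h with h | h
    · rcases le_total a b with hab | hab
      · rw [h, max_eq_right hab]; exact List.mem_cons_of_mem _ List.mem_cons_self
      · rw [h, max_eq_left hab]; exact List.mem_cons_self
    · exact List.mem_cons_of_mem _ (List.mem_cons_of_mem _ h)

lemma foldl_max_ge (l : List Int) : ∀ (a x : Int), x ∈ a :: l → x ≤ l.foldl max a := by
  induction l with
  | nil => intro a x hx; simp_all
  | cons b rest ih =>
    intro a x hx
    rw [List.foldl_cons]
    have hbase : max a b ≤ rest.foldl max (max a b) := ih (max a b) (max a b) List.mem_cons_self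
    rcases List.mem_cons.mp hx with h | h
    · subst h; exact le_trans (le_max_left _ _) hbase
    · rcases List.mem_cons.mp h with h2 | h2
      · subst h2; exact le_trans (le_max_right _ _) hbase
      · exact ih (max a b) x (List.mem_cons_of_mem _ h2)

lemma filaVacia_false_iff (f : List String) :
    filaVacia f = false ↔ f.any (fun v => v ≠ ".") = true := by
  simp [filaVacia, List.all_eq_not_any_not]

-- B's top is the first hit row
lemma scanTop_head (l : List (List String)) : ∀ (t f0 : Int) (frest : List Int),
    rowsIdx l t = f0 :: frest → scanTop l t = f0 := by
  induction l with
  | nil => intro t f0 frest h; simp [rowsIdx, PySem.List.enumerate_nil] at h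
  | cons f rest ih =>
    intro t f0 frest h
    by_cases hp : ∃ x ∈ f, ¬ x = "."
    · have hr : rowsIdx (f :: rest) t = t :: rowsIdx rest (t + 1) := by
        simp [rowsIdx, PySem.List.enumerate_cons, hp]
      rw [hr] at h
      have hfv : filaVacia f = false := (filaVacia_false_iff f).mpr (by simpa using hp)
      injection h with h1 _
      simp [scanTop, hfv, h1]
    · have hr : rowsIdx (f :: rest) t = rowsIdx rest (t + 1) := by
        simp [rowsIdx, PySem.List.enumerate_cons, hp]
      have hfv : filaVacia f = true := by
        by_contra hc
        exact hp (by simpa using (filaVacia_false_iff f).mp (Bool.eq_false_iff.mpr hc))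
      rw [hr] at h
      simp [scanTop, hfv]
      exact ih (t + 1) f0 frest h

lemma mem_rowsIdx_bounds (l : List (List String)) : ∀ (t j : Int),
    j ∈ rowsIdx l t → t ≤ j ∧ j < t + l.length := by
  induction l with
  | nil => intro t j h; simp [rowsIdx, PySem.List.enumerate_nil] at h
  | cons f rest ih =>
    intro t j h
    by_cases hp : ∃ x ∈ f, ¬ x = "."
    · rw [show rowsIdx (f :: rest) t = t :: rowsIdx rest (t + 1) by
        simp [rowsIdx, PySem.List.enumerate_cons, hp]] at h
      rw [List.mem_cons] at h
      rcases h with h | h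
      · refine ⟨by omega, ?_⟩
        simp only [List.length_cons]; push_cast; omega
      · obtain ⟨h1, h2⟩ := ih (t + 1) j h
        refine ⟨by omega, ?_⟩
        simp only [List.length_cons]; push_cast; omega
    · rw [show rowsIdx (f :: rest) t = rowsIdx rest (t + 1) by
        simp [rowsIdx, PySem.List.enumerate_cons, hp]] at h
      obtain ⟨h1, h2⟩ := ih (t + 1) j h
      refine ⟨by omega, ?_⟩
      simp only [List.length_cons]; push_cast; omega

lemma rowsIdx_append_singleton (ms : List (List String)) (f : List String) (t : Int) :
    rowsIdx (ms ++ [f]) t =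
      rowsIdx ms t ++ (if f.any (fun v => v ≠ ".") then [t + ms.length] else []) := by
  unfold rowsIdx
  rw [PySem.List.enumerate_append, List.filter_append, List.map_append]
  congr 1
  by_cases hp : ∃ x ∈ f, ¬ x = "."
  · simp [PySem.List.enumerate_cons, PySem.List.enumerate_nil, hp]
  · simp [PySem.List.enumerate_cons, PySem.List.enumerate_nil, hp]

-- B's bot is one past the last hit row
lemma scanBot_getLast (l : List (List String)) : ∀ (t top g : Int),
    (rowsIdx l t).getLast? = some g → top ≤ g →
    scanBot top l.reverse (t + l.length) = g + 1 := by
  induction l using List.reverseRecOn with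
  | nil => intro t top g hg _; simp [rowsIdx, PySem.List.enumerate_nil] at hg
  | append_singleton ms f ih =>
    intro t top g hg htop
    rw [rowsIdx_append_singleton] at hg
    rw [List.reverse_append, List.reverse_singleton, List.singleton_append]
    by_cases hf : f.any (fun v => v ≠ ".") = true
    · rw [if_pos hf, List.getLast?_concat] at hg
      have hgeq : g = t + ms.length := by injection hg with h; omega
      have hfv : filaVacia f = false := (filaVacia_false_iff f).mpr hf
      simp only [scanBot, hfv, Bool.and_false, if_neg (by simp : ¬ (false = true))]
      simp [hgeq, List.length_append]
      omega
    · rw [if_neg hf, List.append_nil] at hg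
      have hmem : g ∈ rowsIdx ms t := List.mem_of_getLast? hg
      have hb := mem_rowsIdx_bounds ms t g hmem
      have hfv : filaVacia f = true := by
        by_contra hc
        exact hf ((filaVacia_false_iff f).mp (Bool.eq_false_iff.mpr hc))
      have hlt : top < t + ((ms ++ [f]).length : Int) := by
        simp [List.length_append]; omega
      simp only [scanBot, hfv, Bool.and_true, decide_eq_true_eq]
      rw [if_pos hlt]
      have : t + ((ms ++ [f]).length : Int) - 1 = t + (ms.length : Int) := by
        simp [List.length_append]; omega
      rw [show (t + ((ms ++ [f]).length : Int) - 1) = t + (ms.length : Int) from this]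
      exact ih t top g hg htop

-- membership in the hit-column list of one row
lemma mem_colsIdx_iff (f : List String) : ∀ (t j : Int),
    j ∈ colsIdx f t ↔
      (t ≤ j ∧ j - t < (f.length : Int) ∧ PySem.List.pyGet? f (j - t) ≠ some ".") := by
  induction f with
  | nil =>
    intro t j
    simp only [colsIdx, PySem.List.enumerate_nil, List.filter_nil, List.map_nil,
      List.not_mem_nil, false_iff, not_and]
    intro _ h2
    simp at h2
    omega
  | cons v rest ih =>
    intro t j
    by_cases hj : j = t
    · subst hj
      by_cases hv : v = "."
      · rw [show colsIdx (v :: rest) j = colsIdx rest (j + 1) by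
          simp [colsIdx, PySem.List.enumerate_cons, hv]]
        constructor
        · intro h; exact absurd ((ih (j + 1) j).mp h).1 (by omega)
        · intro ⟨_, _, hget⟩
          exact absurd (by simp [hv]) hget
      · rw [show colsIdx (v :: rest) j = j :: colsIdx rest (j + 1) by
          simp [colsIdx, PySem.List.enumerate_cons, hv]]
        constructor
        · intro _
          refine ⟨le_refl j, by simp only [List.length_cons]; push_cast; omega, ?_⟩
          simp [hv]
        · intro _; simp
    · have hsplit : j ∈ colsIdx (v :: rest) t ↔ j ∈ colsIdx rest (t + 1) := by
        by_cases hv : v = "."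
        · rw [show colsIdx (v :: rest) t = colsIdx rest (t + 1) by
            simp [colsIdx, PySem.List.enumerate_cons, hv]]
        · rw [show colsIdx (v :: rest) t = t :: colsIdx rest (t + 1) by
            simp [colsIdx, PySem.List.enumerate_cons, hv]]
          simp [hj]
      rw [hsplit, ih (t + 1) j]
      by_cases ht : t ≤ j
      · have hgt : t + 1 ≤ j := by omega
        have hn : j - t = ((j - t - 1).toNat : Int) + 1 := by omega
        constructor
        · intro ⟨_, hlen, hget⟩
          refine ⟨ht, by simp [List.length_cons]; omega, ?_⟩
          rw [hn, PySem.List.pyGet?_cons_succ]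
          have : ((j - t - 1).toNat : Int) = j - (t + 1) := by omega
          rw [this]; exact hget
        · intro ⟨_, hlen, hget⟩
          rw [hn, PySem.List.pyGet?_cons_succ] at hget
          have heq : ((j - t - 1).toNat : Int) = j - (t + 1) := by omega
          rw [heq] at hget
          refine ⟨hgt, ?_, hget⟩
          simp [List.length_cons] at hlen; omega
      · constructor
        · intro ⟨h, _, _⟩; omega
        · intro ⟨h, _, _⟩; omega

lemma mem_allCols_iff (matriz : List (List String)) (j : Int) :
    j ∈ allCols matriz ↔
      ∃ f ∈ matriz, 0 ≤ j ∧ j < (f.length : Int) ∧ PySem.List.pyGet? f j ≠ some "." := by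
  unfold allCols
  rw [List.mem_flatMap]
  constructor
  · rintro ⟨f, hf, hm⟩
    have := (mem_colsIdx_iff f 0 j).mp hm
    exact ⟨f, hf, this.1, by simpa using this.2.1, by simpa using this.2.2⟩
  · rintro ⟨f, hf, h0, hlen, hget⟩
    exact ⟨f, hf, (mem_colsIdx_iff f 0 j).mpr ⟨h0, by simpa using hlen, by simpa using hget⟩⟩

lemma colVacia_false_iff (matriz : List (List String)) (j : Int) (hj : 0 ≤ j) :
    colVacia matriz j = false ↔ j ∈ allCols matriz := by
  rw [mem_allCols_iff]
  unfold colVacia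
  rw [List.all_eq_false]
  constructor
  · rintro ⟨f, hf, hval⟩
    simp only [Bool.or_eq_true, decide_eq_true_eq, beq_iff_eq, not_or, not_le] at hval
    exact ⟨f, hf, hj, hval.1, hval.2⟩
  · rintro ⟨f, hf, _, hlen, hget⟩
    refine ⟨f, hf, ?_⟩
    simp only [Bool.or_eq_true, decide_eq_true_eq, beq_iff_eq, not_or, not_le]
    exact ⟨by omega, hget⟩

lemma le_foldl_max_len (l : List (List String)) (a : Int) :
    a ≤ l.foldl (fun w f => max w (f.length : Int)) a := by
  induction l generalizing a with
  | nil => simp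
  | cons f rest ih =>
    exact le_trans (le_max_left a (f.length : Int)) (ih (max a (f.length : Int)))

lemma mem_le_foldl_max_len (l : List (List String)) (a : Int) (f : List String) (hf : f ∈ l) :
    (f.length : Int) ≤ l.foldl (fun w g => max w (g.length : Int)) a := by
  induction l generalizing a with
  | nil => simp at hf
  | cons g rest ih =>
    rw [List.mem_cons] at hf
    rcases hf with h | h
    · exact le_trans (le_max_right a (f.length : Int)) (by subst h; exact le_foldl_max_len rest _)
    · exact ih _ h

lemma mem_allCols_bounds (matriz : List (List String)) (j : Int) (h : j ∈ allCols matriz) :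
    0 ≤ j ∧ j < matriz.foldl (fun w f => max w (f.length : Int)) 0 := by
  obtain ⟨f, hf, h0, hlen, _⟩ := (mem_allCols_iff matriz j).mp h
  exact ⟨h0, lt_of_lt_of_le hlen (mem_le_foldl_max_len matriz 0 f hf)⟩

lemma scanLeft_eq (matriz : List (List String)) : ∀ (fuel : Nat) (j m : Int),
    (∀ i, j ≤ i → i < m → colVacia matriz i = true) → colVacia matriz m = false →
    j ≤ m → m ≤ j + fuel → scanLeft matriz fuel j = m := by
  intro fuel
  induction fuel with
  | zero => intro j m _ _ h1 h2; simp at h2; simp [scanLeft]; omega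
  | succ k ih =>
    intro j m hall hm h1 h2
    by_cases hjm : j = m
    · subst hjm; simp [scanLeft, hm]
    · have hcol : colVacia matriz j = true := hall j (le_refl j) (by omega)
      simp only [scanLeft, hcol, if_pos]
      exact ih (j + 1) m (fun i hi => hall i (by omega)) hm (by omega) (by push_cast at h2 ⊢; omega)

lemma scanRight_eq (matriz : List (List String)) : ∀ (fuel : Nat) (j M : Int),
    (∀ i, M < i → i < j → colVacia matriz i = true) → colVacia matriz M = false →
    M + 1 ≤ j → j ≤ M + 1 + fuel → scanRight matriz fuel j = M + 1 := by
  intro fuel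
  induction fuel with
  | zero => intro j M _ _ h1 h2; simp at h2; simp [scanRight]; omega
  | succ k ih =>
    intro j M hall hM h1 h2
    by_cases hjm : j = M + 1
    · subst hjm
      simp only [scanRight, show M + 1 - 1 = M by omega, hM]
      simp
    · have hcol : colVacia matriz (j - 1) = true := hall (j - 1) (by omega) (by omega)
      simp only [scanRight, hcol, if_pos]
      exact ih (j - 1) M (fun i hi hij => hall i hi (by omega)) hM (by omega)
        (by push_cast at h2 ⊢; omega)

-- ===== VERDICT (by name: the statement is the Claim_ definition above) =====
theorem recortar_matriz_spec : Claim_equal_recortar_matriz := by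
  intro matriz _dom hpre
  simp only [Spec_recortar_matriz, recortar_matriz, recortar_matriz_alt]
  have hA : (PySem.List.enumerate matriz 0).foldl
      (fun s p =>
        (PySem.List.enumerate p.2 0).foldl
          (fun s q =>
            if q.2 ≠ "." then
              (upMin s.1 p.1, upMax s.2.1 p.1, upMin s.2.2.1 q.1, upMax s.2.2.2 q.1)
            else s) s)
      (none, none, none, none)
    = ((rowsIdx matriz 0).foldl upMin none,
       (rowsIdx matriz 0).foldl upMax none,
       (allCols matriz).foldl upMin none,
       (allCols matriz).foldl upMax none) := outer_char matriz 0 (none, none, none, none)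
  have hany : matriz.any (fun fila => fila.any (fun v => v ≠ ".")) = true := by
    simp only [List.any_eq_true, decide_eq_true_eq]
    obtain ⟨fila, hfm, v, hvf, hv⟩ := hpre
    exact ⟨fila, hfm, v, hvf, hv⟩
  have hrows_ne : rowsIdx matriz 0 ≠ [] := (rowsIdx_ne_nil_iff matriz 0).mpr hany
  have hcols_ne : allCols matriz ≠ [] := (allCols_ne_nil_iff matriz).mpr hany
  obtain ⟨f0, frest, hfeq⟩ := List.exists_cons_of_ne_nil hrows_ne
  obtain ⟨c0, crest, hceq⟩ := List.exists_cons_of_ne_nil hcols_ne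
  have hsorted : ((f0 :: frest) : List Int).Pairwise (· ≤ ·) := by
    rw [← hfeq]; exact rowsIdx_sorted matriz 0
  -- the four A-side bound values
  set g : Int := (f0 :: frest).getLast (by simp) with hgdef
  have hmin_rows : (rowsIdx matriz 0).foldl upMin none = some f0 := by
    rw [hfeq, List.foldl_cons]
    show frest.foldl upMin (upMin none f0) = _
    rw [show upMin none f0 = some f0 from rfl, foldl_upMin_some,
      foldl_min_of_forall_le f0 frest (fun x hx => (List.pairwise_cons.mp hsorted).1 x hx)]
  have hmax_rows : (rowsIdx matriz 0).foldl upMax none = some g := by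
    rw [hfeq, List.foldl_cons]
    show frest.foldl upMax (upMax none f0) = _
    rw [show upMax none f0 = some f0 from rfl, foldl_upMax_some, foldl_max_sorted f0 frest hsorted]
  set m : Int := crest.foldl min c0 with hmdef
  set M : Int := crest.foldl max c0 with hMdef
  have hmin_cols : (allCols matriz).foldl upMin none = some m := by
    rw [hceq, List.foldl_cons]
    show crest.foldl upMin (upMin none c0) = _
    rw [show upMin none c0 = some c0 from rfl, foldl_upMin_some]
  have hmax_cols : (allCols matriz).foldl upMax none = some M := by
    rw [hceq, List.foldl_cons]
    show crest.foldl upMax (upMax none c0) = _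
    rw [show upMax none c0 = some c0 from rfl, foldl_upMax_some]
  -- B's row bounds
  have htop : scanTop matriz 0 = f0 := scanTop_head matriz 0 f0 frest hfeq
  have hf0g : f0 ≤ g := by
    have hgm : g ∈ f0 :: frest := List.getLast_mem (by simp)
    rw [List.mem_cons] at hgm
    rcases hgm with h | h
    · omega
    · exact (List.pairwise_cons.mp hsorted).1 g h
  have hbot : scanBot f0 matriz.reverse ((matriz.length : Int)) = g + 1 := by
    have hg? : (rowsIdx matriz 0).getLast? = some g := by
      rw [hfeq, List.getLast?_eq_some_getLast]
    have := scanBot_getLast matriz 0 f0 g hg? hf0g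
    simpa using this
  -- B's column bounds
  have hm_mem : m ∈ allCols matriz := by rw [hceq]; exact foldl_min_mem crest c0
  have hM_mem : M ∈ allCols matriz := by rw [hceq]; exact foldl_max_mem crest c0
  have hm_le : ∀ x ∈ allCols matriz, m ≤ x := by
    intro x hx; rw [hceq] at hx; exact foldl_min_le crest c0 x hx
  have hM_ge : ∀ x ∈ allCols matriz, x ≤ M := by
    intro x hx; rw [hceq] at hx; exact foldl_max_ge crest c0 x hx
  set ancho : Int := matriz.foldl (fun w f => max w (f.length : Int)) 0 with hanchodef
  have hm_b := mem_allCols_bounds matriz m hm_mem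
  have hM_b := mem_allCols_bounds matriz M hM_mem
  have hmM : m ≤ M := hm_le M hM_mem
  have hizq : scanLeft matriz ancho.toNat 0 = m := by
    apply scanLeft_eq matriz ancho.toNat 0 m
    · intro i h0i him
      by_contra hc
      have : colVacia matriz i = false := Bool.eq_false_iff.mpr hc
      have hmem := (colVacia_false_iff matriz i h0i).mp this
      have := hm_le i hmem; omega
    · exact Bool.eq_false_iff.mpr (fun hc => absurd ((colVacia_false_iff matriz m hm_b.1).mpr hm_mem) (by simp [hc]))
    · exact hm_b.1
    · have : (ancho.toNat : Int) = ancho := Int.toNat_of_nonneg (le_foldl_max_len matriz 0)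
      omega
  have hder : scanRight matriz (ancho - m).toNat ancho = M + 1 := by
    apply scanRight_eq matriz (ancho - m).toNat ancho M
    · intro i hMi hia
      by_contra hc
      have : colVacia matriz i = false := Bool.eq_false_iff.mpr hc
      have hmem := (colVacia_false_iff matriz i (by omega)).mp this
      have := hM_ge i hmem; omega
    · exact Bool.eq_false_iff.mpr (fun hc => absurd ((colVacia_false_iff matriz M hM_b.1).mpr hM_mem) (by simp [hc]))
    · omega
    · have : ((ancho - m).toNat : Int) = ancho - m := Int.toNat_of_nonneg (by omega)
      omega
  rw [hA, hmin_rows, hmax_rows, hmin_cols, hmax_cols, htop, hbot, hizq, hder]
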